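-- pv_equiv track=rewrite | github.com/bfaguiar/uni | IIA/praticas/other_ppl/Prática/Guião 1/iia_1.py | triple_min
-- ===== SOURCE A (Python) =====
-- def triple_min(list_in):
-- 	if list_in == []:
-- 		return None
-- 	elif len(list_in) == 1:
-- 		return (list_in[0], None ,[])
-- 	elif len(list_in) == 2:
-- 		if list_in[1]>list_in[0]:
-- 			return (list_in[0],list_in[1],[])
-- 		else:
-- 			return (list_in[1],list_in[0],[])
-- 	else:
-- 		smallest, sec_smallest, left = triple_min(list_in[1:])
-- 		if list_in[0]>sec_smallest:
-- 			return (smallest, sec_smallest, left+[list_in[0]])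
-- 		elif list_in[0]<smallest:
-- 			return (list_in[0], smallest, left+[sec_smallest])
-- 		else:
-- 			return (smallest, list_in[0], left+[sec_smallest])
-- ===== SOURCE B (Python) =====
-- def triple_min(list_in):
--     n = len(list_in)
--     if n == 0:
--         return None
--     if n == 1:
--         return (list_in[0], None, [])
--     a, b = list_in[-1], list_in[-2]
--     if a > b:
--         smallest, sec_smallest = b, a
--     else:
--         smallest, sec_smallest = a, b
--     left = []
--     for i in range(n - 3, -1, -1):
--         x = list_in[i]
--         if x > sec_smallest:
--             left.append(x)
--         elif x < smallest:
--             left.append(sec_smallest)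
--             smallest, sec_smallest = x, smallest
--         else:
--             left.append(sec_smallest)
--             sec_smallest = x
--     return (smallest, sec_smallest, left)
-- ===== Notes on version B (the rewrite author's own statement) =====
-- stated objective: faster
-- what changed: Replaced A's recursion on list_in[1:] (which copies a slice and concatenates lists at every level) by a single iterative right-to-left pass that tracks smallest/second-smallest and appends each displaced element to a result list.
import Mathlib
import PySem

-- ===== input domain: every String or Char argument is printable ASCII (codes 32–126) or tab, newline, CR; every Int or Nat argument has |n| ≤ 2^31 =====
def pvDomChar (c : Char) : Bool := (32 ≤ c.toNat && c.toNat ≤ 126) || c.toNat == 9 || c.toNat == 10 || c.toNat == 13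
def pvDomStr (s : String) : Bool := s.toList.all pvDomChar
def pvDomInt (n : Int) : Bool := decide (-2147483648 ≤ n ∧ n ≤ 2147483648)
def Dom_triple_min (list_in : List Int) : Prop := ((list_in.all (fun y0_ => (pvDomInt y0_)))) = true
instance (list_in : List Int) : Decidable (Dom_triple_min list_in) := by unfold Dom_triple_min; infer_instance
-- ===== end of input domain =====

-- B replaces A's O(n^2) recursion (slicing and list concatenation at every level) by a single
-- iterative right-to-left pass tracking the two smallest values and appending displaced ones: O(n).

-- ===== PORT A =====
def triple_min (list_in : List Int) : Option (Int × Option Int × List Int) :=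
  match list_in with
  | [] => none
  | [x] => some (x, none, [])
  | [x, y] => if y > x then some (x, some y, []) else some (y, some x, [])
  | x :: rest₁ :: rest₂ :: rest =>
    -- recursion on list_in[1:]; the recursive result always has the form (s, some t, left)
    match triple_min (rest₁ :: rest₂ :: rest) with
    | some (smallest, some sec_smallest, left) =>
      if x > sec_smallest then some (smallest, some sec_smallest, left ++ [x])
      else if x < smallest then some (x, some smallest, left ++ [sec_smallest])
      else some (smallest, some x, left ++ [sec_smallest])
    | r => r

-- ===== PORT B =====
-- loop body of Source B's for-loop (state: smallest, sec_smallest, left)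
def tmStep (st : Int × Int × List Int) (x : Int) : Int × Int × List Int :=
  match st with
  | (smallest, sec_smallest, left) =>
    if x > sec_smallest then (smallest, sec_smallest, left ++ [x])
    else if x < smallest then (x, smallest, left ++ [sec_smallest])
    else (smallest, x, left ++ [sec_smallest])

def triple_min_alt (list_in : List Int) : Option (Int × Option Int × List Int) :=
  match list_in.reverse with
  | [] => none
  | [x] => some (x, none, [])
  | a :: b :: pre =>       -- a = last element, b = second-to-last; pre = list_in[:-2] reversed
    let init := if a > b then (b, a, ([] : List Int)) else (a, b, ([] : List Int))
    match pre.foldl tmStep init with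
    | (smallest, sec_smallest, left) => some (smallest, some sec_smallest, left)

-- ===== PRECONDITION & SPEC =====
def Spec_triple_min (list_in : List Int) (out : Option (Int × Option Int × List Int)) : Prop := out = triple_min_alt list_in
instance (list_in : List Int) (out : Option (Int × Option Int × List Int)) : Decidable (Spec_triple_min list_in out) := by unfold Spec_triple_min; infer_instance

-- ===== CLAIM (what is proved, stated in full; the proofs are below) =====
def Claim_equal_triple_min : Prop := ∀ (list_in : List Int), Dom_triple_min list_in → Spec_triple_min list_in (triple_min list_in)

-- ===== LEMMAS AND PROOFS =====

-- A's combine step lifted to the Option result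
def tmCombine (x : Int) (r : Option (Int × Option Int × List Int)) : Option (Int × Option Int × List Int) :=
  match r with
  | some (smallest, some sec_smallest, left) =>
    if x > sec_smallest then some (smallest, some sec_smallest, left ++ [x])
    else if x < smallest then some (x, some smallest, left ++ [sec_smallest])
    else some (smallest, some x, left ++ [sec_smallest])
  | r => r

theorem tmCombine_step (x s t : Int) (l : List Int) :
    tmCombine x (some (s, some t, l)) =
    (match tmStep (s, t, l) x with
      | (s', t', l') => some (s', some t', l')) := by
  simp only [tmCombine, tmStep]
  split_ifs <;> rfl

theorem triple_min_cons (x : Int) (m : List Int) (hm : 2 ≤ m.length) :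
    triple_min (x :: m) = tmCombine x (triple_min m) := by
  match m with
  | [] => simp at hm
  | [_] => simp at hm
  | a :: b :: r => rfl

theorem triple_min_alt_cons (x : Int) (m : List Int) (hm : 2 ≤ m.length) :
    triple_min_alt (x :: m) = tmCombine x (triple_min_alt m) := by
  have hrev : 2 ≤ m.reverse.length := by simpa using hm
  match hr : m.reverse with
  | [] => simp [hr] at hrev
  | [_] => simp [hr] at hrev
  | a :: b :: pre =>
    have : (x :: m).reverse = a :: b :: (pre ++ [x]) := by
      simp [List.reverse_cons, hr]
    rw [triple_min_alt, this, triple_min_alt, hr]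
    simp only [List.foldl_append, List.foldl_cons, List.foldl_nil]
    rcases pre.foldl tmStep (if a > b then (b, a, ([] : List Int)) else (a, b, [])) with ⟨s, t, l⟩
    rw [tmCombine_step]

theorem triple_min_eq_alt (list_in : List Int) : triple_min list_in = triple_min_alt list_in := by
  induction list_in with
  | nil => rfl
  | cons x m ih =>
    match m with
    | [] => rfl
    | [y] =>
      simp only [triple_min, triple_min_alt, List.reverse_cons, List.reverse_nil,
        List.nil_append, List.cons_append]
      by_cases h : y > x <;> simp [h]
    | a :: b :: r =>
      have hm : 2 ≤ (a :: b :: r).length := by simp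
      rw [triple_min_cons x _ hm, triple_min_alt_cons x _ hm, ih]

-- ===== VERDICT (by name: the statement is the Claim_ definition above) =====
theorem triple_min_spec : Claim_equal_triple_min := by
  intro list_in _
  unfold Spec_triple_min
  exact triple_min_eq_alt list_in
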